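-- pv_equiv track=rewrite | github.com/jsrimr/ProblemSolving | [kakao_intern]stones.py | compute_gap
-- ===== SOURCE A (Python) =====
-- def compute_gap(stones):
--     max_gap = 0
--     cur = 0
--     for st in stones:
--         if st != 0:
--             cur = 0
--             continue
--         else:
--             cur += 1
--             if cur > max_gap:
--                 max_gap = cur
--
--     return max_gap
-- ===== SOURCE B (Python) =====
-- def compute_gap(stones):
--     # Run-eater: scan each maximal block of zeros with an inner loop and keep
--     # the longest block length, instead of a counter-with-reset per element.
--     n = len(stones)
--     best = 0
--     i = 0
--     while i < n:
--         if stones[i] != 0: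
--             i += 1
--             continue
--         j = i
--         while j < n and stones[j] == 0:
--             j += 1
--         if j - i > best:
--             best = j - i
--         i = j
--     return best
-- ===== Notes on version B (the rewrite author's own statement) =====
-- stated objective: alternative
-- what changed: Replaces the per-element counter-with-reset fold by a run-eater: an outer scan that, at each zero, measures the whole maximal zero block with an inner scan and takes the max of block lengths.
import Mathlib
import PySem

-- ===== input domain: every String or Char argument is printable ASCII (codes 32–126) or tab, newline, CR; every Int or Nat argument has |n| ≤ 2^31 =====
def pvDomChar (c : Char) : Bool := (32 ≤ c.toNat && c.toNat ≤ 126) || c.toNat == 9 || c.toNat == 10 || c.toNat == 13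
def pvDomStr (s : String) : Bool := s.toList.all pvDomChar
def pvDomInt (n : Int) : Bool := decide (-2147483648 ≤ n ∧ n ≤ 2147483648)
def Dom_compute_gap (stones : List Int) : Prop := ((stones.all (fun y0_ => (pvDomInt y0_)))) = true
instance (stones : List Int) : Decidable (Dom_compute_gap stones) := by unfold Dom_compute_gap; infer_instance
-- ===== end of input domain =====

-- B replaces A's counter-with-reset fold by a run-eater scan (alternative decomposition, same cost).

-- ===== PORT A =====
-- A: one pass keeping (max_gap, cur); nonzero resets cur, zero bumps it and maybe max_gap.
def stepA (p : Int × Int) (st : Int) : Int × Int :=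
  if st ≠ 0 then (p.1, 0)
  else
    let cur := p.2 + 1
    (if cur > p.1 then cur else p.1, cur)

def compute_gap (stones : List Int) : Int :=
  (stones.foldl stepA (0, 0)).1

-- ===== PORT B =====
-- B's inner while loop: length of the leading zero block.
def leadZeros : List Int → Nat
  | [] => 0
  | x :: t => if x = 0 then leadZeros t + 1 else 0

-- B's outer while loop: skip a nonzero, or eat one whole zero block and recurse after it.
def scanRuns : List Int → Int
  | [] => 0
  | x :: t =>
    if x = 0 then
      max ((leadZeros (x :: t) : Nat) : Int) (scanRuns ((x :: t).drop (leadZeros (x :: t))))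
    else scanRuns t
termination_by l => l.length
decreasing_by
  · simp only [List.length_drop, List.length_cons]
    have h1 : 1 ≤ leadZeros (x :: t) := by simp [leadZeros, *]
    omega
  · simp

def compute_gap_alt (stones : List Int) : Int := scanRuns stones

-- ===== PRECONDITION & SPEC =====
def Spec_compute_gap (stones : List Int) (out : Int) : Prop := out = compute_gap_alt stones
instance (stones : List Int) (out : Int) : Decidable (Spec_compute_gap stones out) := by unfold Spec_compute_gap; infer_instance

-- ===== CLAIM (what is proved, stated in full; the proofs are below) =====
def Claim_equal_compute_gap : Prop := ∀ (stones : List Int), Dom_compute_gap stones → Spec_compute_gap stones (compute_gap stones)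

-- ===== LEMMAS AND PROOFS =====

-- "extend" semantics of the tail of A's loop: current run already c long.
def ext (c : Int) : List Int → Int
  | [] => c
  | x :: t => if x = 0 then ext (c + 1) t else max c (ext 0 t)

lemma ext_nil (c : Int) : ext c [] = c := rfl

lemma ext_cons (c x : Int) (t : List Int) :
    ext c (x :: t) = if x = 0 then ext (c + 1) t else max c (ext 0 t) := rfl

lemma scanRuns_cons (x : Int) (t : List Int) :
    scanRuns (x :: t) =
      if x = 0 then
        max ((leadZeros (x :: t) : Nat) : Int) (scanRuns ((x :: t).drop (leadZeros (x :: t))))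
      else scanRuns t := by
  rw [scanRuns]

lemma ext_ge (l : List Int) : ∀ c : Int, c ≤ ext c l := by
  induction l with
  | nil => intro c; simp [ext_nil]
  | cons x t ih =>
    intro c
    rw [ext_cons]
    by_cases hx : x = 0
    · rw [if_pos hx]
      exact le_trans (by omega) (ih (c + 1))
    · rw [if_neg hx]
      exact le_max_left _ _

lemma scanRuns_nonneg (l : List Int) : 0 ≤ scanRuns l := by
  induction l with
  | nil => simp [scanRuns]
  | cons x t ih =>
    rw [scanRuns_cons]
    by_cases hx : x = 0
    · rw [if_pos hx]
      exact le_trans (Int.natCast_nonneg _) (le_max_left _ _)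
    · rw [if_neg hx]; exact ih

-- scanRuns satisfies its "eat one block" equation even when the block is empty.
lemma scanRuns_eat (l : List Int) :
    scanRuns l = max ((leadZeros l : Nat) : Int) (scanRuns (l.drop (leadZeros l))) := by
  cases l with
  | nil => simp [scanRuns, leadZeros]
  | cons x t =>
    by_cases hx : x = 0
    · rw [scanRuns_cons, if_pos hx]
    · rw [scanRuns_cons, if_neg hx]
      have h0 : leadZeros (x :: t) = 0 := by simp [leadZeros, hx]
      rw [h0]
      simp only [Nat.cast_zero, List.drop_zero]
      rw [scanRuns_cons, if_neg hx]
      have := scanRuns_nonneg t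
      omega

lemma ext_eq (l : List Int) : ∀ c : Int, 0 ≤ c →
    ext c l = max (c + ((leadZeros l : Nat) : Int)) (scanRuns (l.drop (leadZeros l))) := by
  induction l with
  | nil =>
    intro c hc
    simp [ext_nil, leadZeros, scanRuns]
    omega
  | cons x t ih =>
    intro c hc
    rw [ext_cons]
    by_cases hx : x = 0
    · rw [if_pos hx, ih (c + 1) (by omega)]
      have hl : leadZeros (x :: t) = leadZeros t + 1 := by simp [leadZeros, hx]
      rw [hl]
      have hd : (x :: t).drop (leadZeros t + 1) = t.drop (leadZeros t) := rfl
      rw [hd]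
      push_cast
      omega
    · rw [if_neg hx, ih 0 le_rfl]
      have hl : leadZeros (x :: t) = 0 := by simp [leadZeros, hx]
      rw [hl]
      simp only [Nat.cast_zero, List.drop_zero, zero_add]
      rw [scanRuns_cons, if_neg hx]
      rw [scanRuns_eat t]
      omega

lemma ext_eq_scanRuns (l : List Int) : ext 0 l = scanRuns l := by
  rw [ext_eq l 0 le_rfl, zero_add, ← scanRuns_eat]

-- A's fold from any reachable state (0 ≤ c ≤ m) computes max m (ext c l).
lemma foldA_eq (l : List Int) : ∀ m c : Int, 0 ≤ c → c ≤ m →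
    (l.foldl stepA (m, c)).1 = max m (ext c l) := by
  induction l with
  | nil => intro m c hc hcm; simp [ext_nil]; omega
  | cons x t ih =>
    intro m c hc hcm
    rw [List.foldl_cons, ext_cons]
    by_cases hx : x = 0
    · rw [if_pos hx]
      have hstep : stepA (m, c) x = (if c + 1 > m then c + 1 else m, c + 1) := by
        simp [stepA, hx]
      rw [hstep]
      have hmax : (if c + 1 > m then c + 1 else m) = max m (c + 1) := by omega
      rw [hmax, ih (max m (c + 1)) (c + 1) (by omega) (le_max_right _ _)]
      have hext := ext_ge t (c + 1)
      omega
    · rw [if_neg hx]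
      have hstep : stepA (m, c) x = (m, 0) := by simp [stepA, hx]
      rw [hstep, ih m 0 le_rfl (by omega)]
      omega

-- ===== VERDICT (by name: the statement is the Claim_ definition above) =====
theorem compute_gap_spec : Claim_equal_compute_gap := by
  intro stones _
  show compute_gap stones = compute_gap_alt stones
  unfold compute_gap compute_gap_alt
  rw [foldA_eq stones 0 0 le_rfl le_rfl, ext_eq_scanRuns]
  have := scanRuns_nonneg stones
  omega
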